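-- pv_equiv track=rewrite | github.com/egementunca/sat_revsynth | src/gates/gate_set.py | enumerate_gates
-- ===== SOURCE A (Python) =====
-- from typing import List, Tuple, Any
--
-- def enumerate_gates(width: int) -> List[Tuple[List[int], int]]:
--     """Enumerate all MCT gates.
--
--     Returns:
--         List of (controls, target) tuples.
--     """
--     from itertools import combinations
--
--     gates = []
--     for target in range(width):
--         other_wires = [w for w in range(width) if w != target]
--         # All subsets of other wires as controls
--         for num_controls in range(len(other_wires) + 1):
--             for controls in combinations(other_wires, num_controls):
--                 gates.append((list(controls), target))
--     return gates
-- ===== SOURCE B (Python) =====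
-- from typing import List, Tuple
--
-- def enumerate_gates(width: int) -> List[Tuple[List[int], int]]:
--     """Enumerate all MCT gates.
--
--     Precomputes the size-grouped combinations of all wires once and, per
--     target, filters out those containing the target, instead of regenerating
--     combinations of the other wires for every target.
--     """
--     from itertools import combinations
--
--     wires = range(width)
--     by_size = [list(combinations(wires, k)) for k in range(width)]
--     gates = []
--     for target in wires:
--         for group in by_size:
--             for controls in group:
--                 if target not in controls:
--                     gates.append((list(controls), target))
--     return gates
-- ===== Notes on version B (the rewrite author's own statement) =====
-- stated objective: alternative
-- what changed: B precomputes the size-grouped combinations of all wires once and, per target, filters out those containing the target, instead of regenerating combinations of the other wires for every target.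
import Mathlib
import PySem

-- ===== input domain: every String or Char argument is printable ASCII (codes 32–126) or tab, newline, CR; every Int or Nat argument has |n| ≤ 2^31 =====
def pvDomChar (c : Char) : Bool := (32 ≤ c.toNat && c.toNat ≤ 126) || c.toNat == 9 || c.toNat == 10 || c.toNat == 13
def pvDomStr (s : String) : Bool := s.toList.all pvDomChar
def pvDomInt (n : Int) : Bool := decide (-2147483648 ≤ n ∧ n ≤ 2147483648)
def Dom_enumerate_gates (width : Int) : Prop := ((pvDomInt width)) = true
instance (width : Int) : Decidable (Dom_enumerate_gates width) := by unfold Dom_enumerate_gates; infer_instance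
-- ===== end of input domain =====

-- B precomputes the size-grouped combinations of all wires once and filters per target,
-- instead of regenerating combinations of the other wires for every target (objective: alternative).

-- ===== PORT A =====
def enumerate_gates (width : Int) : List (List Int × Int) :=
  (PySem.List.pyRange 0 width 1).foldl (fun gates target =>
    let other_wires := (PySem.List.pyRange 0 width 1).filter (fun w => decide (w ≠ target))
    (PySem.List.pyRange 0 ((other_wires.length : Int) + 1) 1).foldl (fun gates num_controls =>
      (PySem.List.combinations other_wires num_controls.toNat).foldl (fun gates controls =>
        gates ++ [(controls, target)]) gates) gates) []

-- ===== PORT B =====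
def enumerate_gates_alt (width : Int) : List (List Int × Int) :=
  let wires := PySem.List.pyRange 0 width 1
  let by_size := (PySem.List.pyRange 0 width 1).map (fun k => PySem.List.combinations wires k.toNat)
  wires.foldl (fun gates target =>
    by_size.foldl (fun gates group =>
      group.foldl (fun gates controls =>
        if target ∉ controls then gates ++ [(controls, target)] else gates) gates) gates) []

-- ===== PRECONDITION & SPEC =====
def Spec_enumerate_gates (width : Int) (out : List (List Int × Int)) : Prop := out = enumerate_gates_alt width
instance (width : Int) (out : List (List Int × Int)) : Decidable (Spec_enumerate_gates width out) := by unfold Spec_enumerate_gates; infer_instance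

-- ===== CLAIM (what is proved, stated in full; the proofs are below) =====
def Claim_equal_enumerate_gates : Prop := ∀ (width : Int), Dom_enumerate_gates width → Spec_enumerate_gates width (enumerate_gates width)

-- ===== LEMMAS AND PROOFS =====

-- Filtering combinations by "does not contain t" = combinations of the filtered list.
theorem comb_filter (t : Int) (xs : List Int) (r : Nat) :
    (PySem.List.combinations xs r).filter (fun c => decide (t ∉ c))
      = PySem.List.combinations (xs.filter (fun w => decide (w ≠ t))) r := by
  induction xs generalizing r with
  | nil => cases r <;> simp [PySem.List.combinations_zero, PySem.List.combinations_nil_succ]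
  | cons x xs ih =>
    cases r with
    | zero => simp [PySem.List.combinations_zero]
    | succ r =>
      by_cases hx : x = t
      · subst hx
        simp only [PySem.List.combinations_cons_succ, List.filter_append, List.filter_map]
        have h1 : (PySem.List.combinations xs r).filter
            ((fun c => decide (x ∉ c)) ∘ (fun c => x :: c)) = [] := by
          apply List.filter_eq_nil_iff.mpr
          intro c _
          simp
        rw [h1]
        simpa using ih (r + 1)
      · simp only [PySem.List.combinations_cons_succ, List.filter_append, List.filter_map,
          List.filter_cons]
        have h2 : (PySem.List.combinations xs r).filter
            ((fun c => decide (t ∉ c)) ∘ (fun c => x :: c))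
            = (PySem.List.combinations xs r).filter (fun c => decide (t ∉ c)) := by
          apply List.filter_congr
          intro c _
          simp [Ne.symm hx]
        rw [h2, ih, ih]
        simp [hx, PySem.List.combinations_cons_succ]

-- Removing one member from the (nodup) range leaves width-1 wires.
theorem other_len (width target : Int) (ht : target ∈ PySem.List.pyRange 0 width 1) :
    (((PySem.List.pyRange 0 width 1).filter (fun w => decide (w ≠ target))).length : Int) + 1
      = width := by
  have hnd := PySem.List.nodup_pyRange_one (a := 0) (b := width)
  have he : (PySem.List.pyRange 0 width 1).filter (fun w => decide (w ≠ target))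
      = (PySem.List.pyRange 0 width 1).erase target := by
    rw [List.Nodup.erase_eq_filter hnd]
    apply List.filter_congr
    intro w _
    by_cases h : w = target
    · simp [h, bne]
    · simp [bne, h]
  rw [he, List.length_erase_of_mem ht, PySem.List.length_pyRange_one]
  have hw : 0 < width := by
    have := (PySem.List.mem_pyRange_one.mp ht)
    omega
  have hlen : 1 ≤ (width - 0).toNat := by omega
  omega

theorem enumerate_gates_eq (width : Int) :
    enumerate_gates width = enumerate_gates_alt width := by
  unfold enumerate_gates enumerate_gates_alt
  apply PySem.List.foldl_congr_mem
  intro gates target ht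
  simp only [PySem.List.foldl_append_singleton_eq_map
      (f := fun controls => (controls, target)),
    PySem.List.foldl_append_eq_flatMap, PySem.List.foldl_append_ite
      (p := fun controls => target ∉ controls) (f := fun controls => (controls, target)),
    List.flatMap_map]
  rw [other_len width target ht]
  simp only [comb_filter]

-- ===== VERDICT (by name: the statement is the Claim_ definition above) =====
theorem enumerate_gates_spec : Claim_equal_enumerate_gates := by
  intro width _
  exact enumerate_gates_eq width
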